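-- pv_equiv track=rewrite | github.com/erfanzar/EOpod | eopod/_eopod_cli.py | _preferred_tpu_target_tags
-- ===== SOURCE A (Python) =====
-- def _normalize_target_tags(tags: list[str] | tuple[str, ...] | None) -> list[str]:
--     normalized = []
--     seen = set()
--     for tag in tags or []:
--         value = str(tag).strip()
--         if not value or value in seen:
--             continue
--         seen.add(value)
--         normalized.append(value)
--     return normalized
--
-- def _preferred_tpu_target_tags(tags: list[str] | tuple[str, ...] | None) -> list[str]:
--     normalized = _normalize_target_tags(tags)
--     if not normalized:
--         return []
--
--     # TPU-specific per-node tags are the safest match for firewall rules.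
--     tpu_specific = [tag for tag in normalized if tag.startswith("tpu-")]
--     if tpu_specific:
--         return tpu_specific
--
--     non_google = [tag for tag in normalized if not tag.startswith("x-google-")]
--     return non_google or normalized
-- ===== SOURCE B (Python) =====
-- def _rank(tag):
--     # priority class: 0 = tpu-specific, 1 = other non-google, 2 = x-google-
--     if tag.startswith("tpu-"):
--         return 0
--     if not tag.startswith("x-google-"):
--         return 1
--     return 2
--
-- def _preferred_tpu_target_tags(tags):
--     # Min-rank selection: dedupe via dict.fromkeys, assign each tag a priority
--     # rank, then keep exactly the tags of the best (smallest) rank present.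
--     normalized = list(dict.fromkeys(v for v in (str(t).strip() for t in tags or []) if v))
--     if not normalized:
--         return []
--     best = min(map(_rank, normalized))
--     return [t for t in normalized if _rank(t) == best]
-- ===== Notes on version B (the rewrite author's own statement) =====
-- stated objective: alternative
-- what changed: Replaces A's staged fallback (return tpu_specific, else non_google, else normalized) by a min-rank selection: each deduped tag (deduped via dict.fromkeys instead of a seen-set loop) gets a priority rank 0/1/2 and B returns the tags of the minimal rank present.
import Mathlib
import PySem

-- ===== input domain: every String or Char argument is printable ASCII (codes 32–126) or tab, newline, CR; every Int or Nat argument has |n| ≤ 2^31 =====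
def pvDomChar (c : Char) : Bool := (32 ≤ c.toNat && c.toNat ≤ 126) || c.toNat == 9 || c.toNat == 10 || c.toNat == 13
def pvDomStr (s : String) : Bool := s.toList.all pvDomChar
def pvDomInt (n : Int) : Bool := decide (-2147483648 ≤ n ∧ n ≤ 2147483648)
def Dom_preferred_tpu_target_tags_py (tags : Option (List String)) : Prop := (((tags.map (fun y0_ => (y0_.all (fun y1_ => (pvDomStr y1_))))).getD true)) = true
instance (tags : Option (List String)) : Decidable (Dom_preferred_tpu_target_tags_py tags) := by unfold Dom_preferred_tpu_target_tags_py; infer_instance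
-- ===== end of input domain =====

-- B replaces A's staged fallback (tpu_specific, else non_google, else normalized) by a min-rank
-- selection over tags deduped via dict.fromkeys; same return value ('alternative', not faster).

-- ===== PORT A =====
-- loop body of _normalize_target_tags: strip, skip empty/seen, else record
def pvAStep (st : PySem.Set String × List String) (tag : String) :
    PySem.Set String × List String :=
  let value := PySem.Str.strip tag
  if value = "" ∨ PySem.Set.contains st.1 value then st
  else (PySem.Set.add st.1 value, st.2 ++ [value])

def normalize_target_tags_py (tags : Option (List String)) : List String :=
  ((tags.getD []).foldl pvAStep (PySem.Set.empty, [])).2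

def preferred_tpu_target_tags_py (tags : Option (List String)) : List String :=
  let normalized := normalize_target_tags_py tags
  if normalized = [] then []
  else
    let tpu_specific := normalized.filter (fun t => PySem.Str.startswith t "tpu-")
    if tpu_specific ≠ [] then tpu_specific
    else
      let non_google := normalized.filter (fun t => !(PySem.Str.startswith t "x-google-"))
      if non_google ≠ [] then non_google else normalized

-- ===== PORT B =====
-- _rank: priority class of a tag
def pvRank (t : String) : Int :=
  if PySem.Str.startswith t "tpu-" then 0
  else if !(PySem.Str.startswith t "x-google-") then 1
  else 2

-- dict.fromkeys dedup of the stripped non-empty tags, then keep the tags of minimal rank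
-- (min(...) raises on an empty list; the 'if not normalized' guard is the 'none' branch here)
def preferred_tpu_target_tags_py_alt (tags : Option (List String)) : List String :=
  let normalized :=
    PySem.List.dedup (((tags.getD []).map PySem.Str.strip).filter (fun v => v ≠ ""))
  match PySem.List.min? (normalized.map pvRank) (fun x => x) with
  | none => []
  | some best => normalized.filter (fun t => pvRank t == best)

-- ===== PRECONDITION & SPEC =====
def Spec_preferred_tpu_target_tags_py (tags : Option (List String)) (out : List String) : Prop := out = preferred_tpu_target_tags_py_alt tags
instance (tags : Option (List String)) (out : List String) : Decidable (Spec_preferred_tpu_target_tags_py tags out) := by unfold Spec_preferred_tpu_target_tags_py; infer_instance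

-- ===== CLAIM =====
def Claim_equal_preferred_tpu_target_tags_py : Prop := ∀ (tags : Option (List String)), Dom_preferred_tpu_target_tags_py tags → Spec_preferred_tpu_target_tags_py tags (preferred_tpu_target_tags_py tags)

-- ===== LEMMAS AND PROOFS =====

-- A's dedup loop keeps its seen-set equal (as a list) to its output list;
-- both equal folding Set.add over the stripped non-empty values.
lemma pvA_fold_inv (l : List String) (s : List String) :
    l.foldl pvAStep (s, s) =
      (((l.map PySem.Str.strip).filter (fun v => v ≠ "")).foldl PySem.Set.add s,
       ((l.map PySem.Str.strip).filter (fun v => v ≠ "")).foldl PySem.Set.add s) := by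
  induction l generalizing s with
  | nil => rfl
  | cons tag rest ih =>
    simp only [List.foldl_cons, List.map_cons]
    by_cases he : PySem.Str.strip tag = ""
    · have hstep : pvAStep (s, s) tag = (s, s) := by
        simp only [pvAStep]; rw [if_pos (Or.inl he)]
      rw [hstep, List.filter_cons_of_neg (by simp [he])]
      exact ih s
    · by_cases hc : PySem.Set.contains s (PySem.Str.strip tag)
      · have hstep : pvAStep (s, s) tag = (s, s) := by
          simp only [pvAStep]; rw [if_pos (Or.inr hc)]
        have hadd : PySem.Set.add s (PySem.Str.strip tag) = s := by
          simp only [PySem.Set.add, hc, if_true]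
        rw [hstep, List.filter_cons_of_pos (by simp [he]), List.foldl_cons, hadd]
        exact ih s
      · rw [Bool.not_eq_true] at hc
        have hstep : pvAStep (s, s) tag =
            (PySem.Set.add s (PySem.Str.strip tag), s ++ [PySem.Str.strip tag]) := by
          simp only [pvAStep]
          rw [if_neg (by
            rintro (h | h)
            · exact he h
            · rw [hc] at h; cases h)]
        have hadd : PySem.Set.add s (PySem.Str.strip tag) = s ++ [PySem.Str.strip tag] := by
          simp only [PySem.Set.add, hc, Bool.false_eq_true, if_false]
        rw [hstep, hadd, List.filter_cons_of_pos (by simp [he]), List.foldl_cons, hadd]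
        exact ih (s ++ [PySem.Str.strip tag])

lemma pv_normalized (tags : Option (List String)) :
    normalize_target_tags_py tags =
      PySem.List.dedup (((tags.getD []).map PySem.Str.strip).filter (fun v => v ≠ "")) := by
  unfold normalize_target_tags_py
  rw [show (PySem.Set.empty : PySem.Set String) = ([] : List String) from rfl]
  rw [pvA_fold_inv (tags.getD []) []]
  simp [PySem.List.dedup_eq_ofList, PySem.Set.ofList_eq_foldl]

lemma pvRank_eq_zero_iff (t : String) :
    pvRank t = 0 ↔ PySem.Str.startswith t "tpu-" = true := by
  unfold pvRank; split_ifs with h1 h2 <;> simp_all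

lemma pvRank_nonneg (t : String) : 0 ≤ pvRank t := by
  unfold pvRank; split_ifs <;> omega

lemma pvRank_eq_one_iff (t : String) :
    pvRank t = 1 ↔ (PySem.Str.startswith t "tpu-" = false ∧
      PySem.Str.startswith t "x-google-" = false) := by
  unfold pvRank; split_ifs with h1 h2 <;> simp_all

lemma pvRank_eq_two_iff (t : String) :
    pvRank t = 2 ↔ (PySem.Str.startswith t "tpu-" = false ∧
      PySem.Str.startswith t "x-google-" = true) := by
  unfold pvRank; split_ifs with h1 h2 <;> simp_all

lemma pvRank_cases (t : String) : pvRank t = 0 ∨ pvRank t = 1 ∨ pvRank t = 2 := by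
  unfold pvRank; split_ifs <;> simp

-- staged selection = min-rank filter, when the minimum exists
lemma pv_select_some (n : List String) (best : Int)
    (hbest : PySem.List.min? (n.map pvRank) (fun x => x) = some best) :
    (if (n.filter (fun t => PySem.Str.startswith t "tpu-")) ≠ [] then
       n.filter (fun t => PySem.Str.startswith t "tpu-")
     else if (n.filter (fun t => !(PySem.Str.startswith t "x-google-"))) ≠ [] then
       n.filter (fun t => !(PySem.Str.startswith t "x-google-"))
     else n) =
    n.filter (fun t => pvRank t == best) := by
  have hmem : best ∈ n.map pvRank := PySem.List.min?_mem hbest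
  have hmin : ∀ y ∈ n.map pvRank, best ≤ y := fun y hy => PySem.List.min?_isMin hbest y hy
  obtain ⟨t0, ht0, ht0r⟩ := List.mem_map.mp hmem
  have hb0 : 0 ≤ best := ht0r ▸ pvRank_nonneg t0
  by_cases h0 : ∃ t ∈ n, PySem.Str.startswith t "tpu-" = true
  · -- best = 0, result = tpu_specific
    obtain ⟨t, ht, htp⟩ := h0
    have hle : best ≤ 0 := by
      have := hmin (pvRank t) (List.mem_map.mpr ⟨t, ht, rfl⟩)
      rwa [(pvRank_eq_zero_iff t).mpr htp] at this
    have hbz : best = 0 := le_antisymm hle hb0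
    subst hbz
    rw [if_pos (by
      simp only [ne_eq, List.filter_eq_nil_iff, not_forall]
      exact ⟨t, ht, by simpa using htp⟩)]
    refine (List.filter_congr ?_).symm
    intro x _
    cases h : PySem.Str.startswith x "tpu-"
    · have : pvRank x ≠ 0 := fun hz => by
        rw [(pvRank_eq_zero_iff x).mp hz] at h; cases h
      simp [this]
    · simp [(pvRank_eq_zero_iff x).mpr h]
  · have h0' : ∀ t ∈ n, PySem.Str.startswith t "tpu-" = false := by
      intro t ht; cases h : PySem.Str.startswith t "tpu-"
      · rfl
      · exact absurd ⟨t, ht, h⟩ h0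
    have htpu_nil : n.filter (fun t => PySem.Str.startswith t "tpu-") = [] := by
      simp only [List.filter_eq_nil_iff]
      intro a ha; simpa using h0' a ha
    rw [if_neg (not_ne_iff.mpr htpu_nil)]
    have hb1 : 1 ≤ best := by
      rcases pvRank_cases t0 with h | h | h
      · have hx := (pvRank_eq_zero_iff t0).mp h
        rw [h0' t0 ht0] at hx; cases hx
      · omega
      · omega
    by_cases h1 : ∃ t ∈ n, PySem.Str.startswith t "x-google-" = false
    · -- best = 1, result = non_google
      obtain ⟨t, ht, htg⟩ := h1
      have hle : best ≤ 1 := by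
        have := hmin (pvRank t) (List.mem_map.mpr ⟨t, ht, rfl⟩)
        rwa [(pvRank_eq_one_iff t).mpr ⟨h0' t ht, htg⟩] at this
      have hbo : best = 1 := le_antisymm hle hb1
      subst hbo
      rw [if_pos (by
        simp only [ne_eq, List.filter_eq_nil_iff, not_forall]
        exact ⟨t, ht, by simpa using htg⟩)]
      refine (List.filter_congr ?_).symm
      intro x hx
      cases h : PySem.Str.startswith x "x-google-"
      · simp [(pvRank_eq_one_iff x).mpr ⟨h0' x hx, h⟩]
      · have : pvRank x ≠ 1 := fun hz => by
          rw [((pvRank_eq_one_iff x).mp hz).2] at h; cases h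
        simp [this]
    · -- best = 2, result = n
      have h1' : ∀ t ∈ n, PySem.Str.startswith t "x-google-" = true := by
        intro t ht; cases h : PySem.Str.startswith t "x-google-"
        · exact absurd ⟨t, ht, h⟩ h1
        · rfl
      have hng_nil : n.filter (fun t => !(PySem.Str.startswith t "x-google-")) = [] := by
        simp only [List.filter_eq_nil_iff]
        intro a ha; simpa using h1' a ha
      rw [if_neg (not_ne_iff.mpr hng_nil)]
      have hb2 : best = 2 := by
        rcases pvRank_cases t0 with h | h | h
        · have hx := (pvRank_eq_zero_iff t0).mp h
          rw [h0' t0 ht0] at hx; cases hx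
        · have hx := ((pvRank_eq_one_iff t0).mp h).2
          rw [h1' t0 ht0] at hx; cases hx
        · omega
      subst hb2
      refine (List.filter_eq_self.mpr ?_).symm
      intro x hx
      simp [(pvRank_eq_two_iff x).mpr ⟨h0' x hx, h1' x hx⟩]

-- full selection, including the empty case
lemma pv_select (n : List String) :
    (if n = [] then []
     else if (n.filter (fun t => PySem.Str.startswith t "tpu-")) ≠ [] then
       n.filter (fun t => PySem.Str.startswith t "tpu-")
     else if (n.filter (fun t => !(PySem.Str.startswith t "x-google-"))) ≠ [] then
       n.filter (fun t => !(PySem.Str.startswith t "x-google-"))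
     else n) =
    (match PySem.List.min? (n.map pvRank) (fun x => x) with
     | none => []
     | some best => n.filter (fun t => pvRank t == best)) := by
  by_cases hn : n = []
  · subst hn; rfl
  · rw [if_neg hn]
    rcases h : PySem.List.min? (n.map pvRank) (fun x => x) with _ | best
    · rw [PySem.List.min?_eq_none_iff] at h
      simp at h
      exact absurd h hn
    · exact pv_select_some n best h

lemma pv_main (tags : Option (List String)) :
    preferred_tpu_target_tags_py tags = preferred_tpu_target_tags_py_alt tags := by
  unfold preferred_tpu_target_tags_py preferred_tpu_target_tags_py_alt
  rw [pv_normalized tags]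
  exact pv_select _

-- ===== VERDICT =====
theorem preferred_tpu_target_tags_py_spec : Claim_equal_preferred_tpu_target_tags_py := by
  intro tags _
  exact pv_main tags
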